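-- pv_equiv track=rewrite | github.com/Antariys3/Requests_Py | Powerful/powerful.py | tag_definition
-- ===== SOURCE A (Python) =====
-- def tag_definition(text, index=0):  # Определение(распознание) тега
--     start_char = "<"
--     end_char = ">"
--
--     while True:
--         start_pos_char = text.find(start_char, index)
--         if start_pos_char == -1:
--             break
--         end_pos_char = text.find(end_char, start_pos_char)
--         if end_pos_char == -1:
--             break
--
--         index = end_pos_char + len(end_char)
--         yield text[start_pos_char:end_pos_char + 1], index
-- ===== SOURCE B (Python) =====
-- def tag_definition(text, index=0):
--     """Single-pass character state machine: accumulate a buffer after '<',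
--     emit it (with the end position) at the next '>'."""
--     start = max(index, 0)
--     buf = None
--     for i in range(start, len(text)):
--         c = text[i]
--         if buf is None:
--             if c == "<":
--                 buf = c
--         else:
--             buf += c
--             if c == ">":
--                 yield buf, i + 1
--                 buf = None
-- ===== Notes on version B (the rewrite author's own statement) =====
-- stated objective: alternative
-- what changed: A jumps through the string with paired str.find calls and slices each tag out; B never searches: it walks every character once in a single pass, maintaining an explicit buffer accumulator that is opened at '<', extended character by character, and emitted with its end position at '>'.
-- outside the precondition, e.g. on tag_definition('a<b <> b', -4): A returns [('<>', 6)], B returns [('<b <>', 6)]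
import Mathlib
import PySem

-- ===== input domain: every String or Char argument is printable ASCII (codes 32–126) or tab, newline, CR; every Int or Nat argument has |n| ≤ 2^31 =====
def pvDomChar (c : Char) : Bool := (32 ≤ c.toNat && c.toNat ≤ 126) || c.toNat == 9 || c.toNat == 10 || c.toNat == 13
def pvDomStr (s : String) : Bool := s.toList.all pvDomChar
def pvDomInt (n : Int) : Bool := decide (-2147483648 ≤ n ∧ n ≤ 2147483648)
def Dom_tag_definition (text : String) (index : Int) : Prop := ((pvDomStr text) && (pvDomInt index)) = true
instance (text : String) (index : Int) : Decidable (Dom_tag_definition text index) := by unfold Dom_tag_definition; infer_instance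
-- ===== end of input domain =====

-- B replaces A's paired str.find jumps and slicing by a single-pass character state machine
-- with an explicit buffer accumulator (opened at '<', emitted at '>'); alternative, same cost.


-- lemmas cited by port A's termination proof
theorem pv_find_lt (t sub : List Char) (hsub : sub ≠ [])
    (h : PySem.Chars.find t sub ≠ -1) :
    0 ≤ PySem.Chars.find t sub ∧ PySem.Chars.find t sub < t.length := by
  have h1 := PySem.Chars.neg_one_le_find t sub
  have h0 : 0 ≤ PySem.Chars.find t sub := by omega
  obtain ⟨hpre, -⟩ := PySem.Chars.find_spec h0
  refine ⟨h0, ?_⟩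
  by_contra hle
  rw [List.drop_eq_nil_of_le (by omega)] at hpre
  exact hsub (List.prefix_nil.mp hpre)

theorem pv_findFrom_bounds (s sub : List Char) (i : Int) (hsub : sub ≠ [])
    (h : PySem.Chars.findFrom s sub i none ≠ -1) :
    (0 ≤ i → i ≤ PySem.Chars.findFrom s sub i none) ∧ 0 ≤ PySem.Chars.findFrom s sub i none ∧
      PySem.Chars.findFrom s sub i none < s.length := by
  unfold PySem.Chars.findFrom at h ⊢
  simp only [Int.toNat_natCast, List.take_length] at h ⊢
  set st := (if i < 0 then if i + (s.length : Int) < 0 then 0 else i + (s.length : Int) else i)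
    with hst
  have h0st : 0 ≤ st := by rw [hst]; split_ifs <;> omega
  have hi_st : 0 ≤ i → st = i := by intro hi; rw [hst, if_neg (by omega)]
  by_cases hlen : (s.length : Int) < st
  · rw [if_pos hlen] at h; exact absurd rfl h
  · rw [if_neg hlen] at h ⊢
    by_cases hrneg : PySem.Chars.find (List.drop st.toNat s) sub = -1
    · rw [if_pos hrneg] at h; exact absurd rfl h
    · rw [if_neg hrneg] at h ⊢
      have hb := pv_find_lt _ sub hsub hrneg
      rw [List.length_drop] at hb
      by_cases hi : 0 ≤ i
      · have := hi_st hi; omega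
      · omega

-- ===== PORT A =====
def tag_definition (text : String) (index : Int) : List (String × Int) :=
  -- while True: start_pos = text.find('<', index); if -1: break; end_pos = text.find('>', start_pos);
  -- if -1: break; index = end_pos + 1; yield text[start_pos:end_pos+1], index
  let start_pos_char := PySem.Str.findFrom text "<" index none
  if h1 : start_pos_char = -1 then []
  else
    let end_pos_char := PySem.Str.findFrom text ">" start_pos_char none
    if h2 : end_pos_char = -1 then []
    else
      (PySem.Str.slice text (some start_pos_char) (some (end_pos_char + 1)), end_pos_char + 1)
        :: tag_definition text (end_pos_char + 1)
termination_by ((text.toList.length : Int) + 1 - index).toNat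
decreasing_by
  have hb1 := pv_findFrom_bounds text.toList "<".toList index (by decide)
    (by simpa [PySem.Str.findFrom] using h1)
  have hb2 := pv_findFrom_bounds text.toList ">".toList
    (PySem.Chars.findFrom text.toList "<".toList index none) (by decide)
    (by simpa [PySem.Str.findFrom] using h2)
  simp only [PySem.Str.findFrom] at *
  by_cases hi : 0 ≤ index
  · have := hb1.1 hi; have := hb2.1 (by omega); omega
  · omega

-- ===== PORT B =====
-- B's loop 'for i in range(start, len(text))' over characters, carrying the buffer state:
-- buf = None outside a tag; buf = some b while accumulating; at '>' emit (buf, i+1).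
-- Ported as structural recursion on the remaining characters (text.toList.drop i), with i
-- the current position; each step examines text[i] exactly as B does.
def scanB : List Char → Nat → Option (List Char) → List (String × Int)
  | [], _, _ => []
  | c :: rest, i, none =>
      if c = '<' then scanB rest (i + 1) (some [c]) else scanB rest (i + 1) none
  | c :: rest, i, some b =>
      let b' := b ++ [c]
      if c = '>' then (String.ofList b', ((i : Int) + 1)) :: scanB rest (i + 1) none
      else scanB rest (i + 1) (some b')

def tag_definition_alt (text : String) (index : Int) : List (String × Int) :=
  -- start = max(index, 0); Int.toNat is exactly that clamp
  scanB (text.toList.drop index.toNat) index.toNat none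

-- ===== PRECONDITION & SPEC =====
-- Pre_ excludes a negative index with -len(text) < index < 0, where A's str.find reads the
-- negative start as an offset from the end of the string while B's max(index, 0) clamps it to
-- 0 — an unspecified corner with two defensible readings (A still returns a value there); for
-- index ≤ -len(text) both readings start at 0 and equality is proved.
def Pre_tag_definition (text : String) (index : Int) : Prop :=
  0 ≤ index ∨ index + (text.toList.length : Int) ≤ 0
instance (text : String) (index : Int) : Decidable (Pre_tag_definition text index) := by
  unfold Pre_tag_definition; infer_instance
def pvWitness_tag_definition : String × Int := ("<a>", 0)

def Spec_tag_definition (text : String) (index : Int) (out : List (String × Int)) : Prop :=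
  out = tag_definition_alt text index
instance (text : String) (index : Int) (out : List (String × Int)) :
    Decidable (Spec_tag_definition text index out) := by unfold Spec_tag_definition; infer_instance

-- ===== CLAIM (what is proved, stated in full; the proofs are below) =====
def Claim_equal_tag_definition : Prop := ∀ (text : String) (index : Int),
  Dom_tag_definition text index → Pre_tag_definition text index →
    Spec_tag_definition text index (tag_definition text index)

-- ===== LEMMAS AND PROOFS =====

-- proof-side helper: the position just past the '>' closing a tag opened before position k
def tagEnd (cs : List Char) (k : Nat) : Option Nat :=
  match h : cs[k]? with
  | none => none
  | some c => if c = '>' then some (k + 1) else tagEnd cs (k + 1)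
termination_by cs.length - k
decreasing_by
  have := (List.getElem?_eq_some_iff.mp h).1
  omega

theorem pv_tagEnd_bounds (cs : List Char) (k : Nat) :
    ∀ e, tagEnd cs k = some e → k < e ∧ e ≤ cs.length := by
  fun_induction tagEnd cs k with
  | case1 k h => intro e he; simp at he
  | case2 k h =>
      intro e he
      simp only [Option.some.injEq] at he
      have := (List.getElem?_eq_some_iff.mp h).1
      omega
  | case3 k c h hne ih =>
      intro e he
      have := ih e he
      omega

-- proof-side helper: A's traversal re-expressed as a position-indexed scan over cs
def scanA (cs : List Char) (p : Nat) : List (String × Int) :=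
  if hp : p < cs.length then
    if cs[p] = '<' then
      match he : tagEnd cs (p + 1) with
      | some e => (String.ofList ((cs.drop p).take (e - p)), (e : Int)) :: scanA cs e
      | none => scanA cs (p + 1)
    else scanA cs (p + 1)
  else []
termination_by cs.length - p
decreasing_by
  · have := pv_tagEnd_bounds cs (p + 1) e he
    omega
  · omega
  · omega

theorem pv_go_nil (sub : List Char) (k : Nat) :
    PySem.Chars.find.go sub [] k = if sub.isEmpty then (k : Int) else -1 := rfl

theorem pv_go_cons (sub : List Char) (h : Char) (t : List Char) (k : Nat) :
    PySem.Chars.find.go sub (h :: t) k =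
      if sub.isPrefixOf (h :: t) then (k : Int) else PySem.Chars.find.go sub t (k + 1) := rfl

theorem pv_go_shift (sub : List Char) : ∀ (t : List Char) (k : Nat),
    PySem.Chars.find.go sub t k =
      if PySem.Chars.find.go sub t 0 = -1 then -1 else k + PySem.Chars.find.go sub t 0 := by
  intro t
  induction t with
  | nil => intro k; rw [pv_go_nil, pv_go_nil]; split_ifs <;> simp_all
  | cons h t ih =>
      intro k
      rw [pv_go_cons, pv_go_cons, ih (k + 1), ih 1]
      have hgge : -1 ≤ PySem.Chars.find.go sub t 0 := PySem.Chars.neg_one_le_find t sub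
      set g := PySem.Chars.find.go sub t 0 with hg
      clear_value g
      split_ifs
      all_goals push_cast at *
      all_goals first | omega | exact absurd trivial (by assumption)

theorem pv_find_cons (c d : Char) (t : List Char) :
    PySem.Chars.find (c :: t) [d] =
      if c = d then 0
      else if PySem.Chars.find t [d] = -1 then -1 else 1 + PySem.Chars.find t [d] := by
  show PySem.Chars.find.go [d] (c :: t) 0 = _
  rw [pv_go_cons]
  by_cases h : c = d
  · subst h; simp [List.isPrefixOf]
  · have hp : ([d].isPrefixOf (c :: t)) = false := by
      simp only [List.isPrefixOf, Bool.and_eq_false_iff]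
      left
      simp [Ne.symm h]
    rw [hp]
    simp only [Bool.false_eq_true, if_false, if_neg h]
    rw [pv_go_shift [d] t 1]
    rfl

theorem pv_findFrom_succ (cs : List Char) (d : Char) (p : Nat) (hp : p < cs.length)
    (hc : cs[p] ≠ d) :
    PySem.Chars.findFrom cs [d] (p : Int) none = PySem.Chars.findFrom cs [d] ((p : Nat) + 1 : Nat) none := by
  rw [PySem.Chars.findFrom_natCast cs [d] p (by omega),
      PySem.Chars.findFrom_natCast cs [d] (p + 1) (by omega)]
  rw [List.drop_eq_getElem_cons hp, pv_find_cons]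
  rw [if_neg hc]
  have hge : -1 ≤ PySem.Chars.find (cs.drop (p + 1)) [d] :=
    PySem.Chars.neg_one_le_find (cs.drop (p + 1)) [d]
  split_ifs
  all_goals push_cast at *
  all_goals first | omega | simp_all

theorem pv_tagEnd_eq (cs : List Char) : ∀ (k : Nat), k ≤ cs.length →
    tagEnd cs k =
      (if PySem.Chars.find (cs.drop k) ['>'] = -1 then none
       else some (k + (PySem.Chars.find (cs.drop k) ['>']).toNat + 1)) := by
  intro k
  fun_induction tagEnd cs k with
  | case1 k h =>
      intro hk
      have hlen : cs.length ≤ k := by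
        by_contra hlt
        rw [List.getElem?_eq_getElem (by omega)] at h
        simp at h
      rw [List.drop_eq_nil_of_le hlen]
      have hnil : PySem.Chars.find ([] : List Char) ['>'] = -1 := rfl
      rw [hnil, if_pos rfl]
  | case2 k h =>
      intro hk
      have hlt := (List.getElem?_eq_some_iff.mp h).1
      have hc : cs[k] = '>' := (List.getElem?_eq_some_iff.mp h).2
      rw [List.drop_eq_getElem_cons hlt, hc, pv_find_cons, if_pos rfl]
      simp
  | case3 k c h hne ih =>
      intro hk
      have hlt := (List.getElem?_eq_some_iff.mp h).1
      have hc : cs[k] = c := (List.getElem?_eq_some_iff.mp h).2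
      rw [ih (by omega)]
      rw [List.drop_eq_getElem_cons hlt, hc, pv_find_cons, if_neg hne]
      have hge := PySem.Chars.neg_one_le_find (cs.drop (k + 1)) ['>']
      by_cases hf : PySem.Chars.find (cs.drop (k + 1)) ['>'] = -1
      · rw [if_pos hf, if_pos (by rw [if_pos hf])]
      · rw [if_neg hf, if_neg (by rw [if_neg hf]; omega)]
        congr 1
        omega

theorem pv_scanA_nil (cs : List Char) : ∀ (n q : Nat), cs.length - q ≤ n →
    PySem.Chars.find (cs.drop q) ['>'] = -1 → scanA cs q = [] := by
  intro n
  induction n with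
  | zero =>
      intro q hq hf
      rw [scanA]
      rw [dif_neg (by omega)]
  | succ n ih =>
      intro q hq hf
      rw [scanA]
      by_cases hlt : q < cs.length
      · rw [dif_pos hlt]
        have hdrop := List.drop_eq_getElem_cons hlt
        rw [hdrop, pv_find_cons] at hf
        have hne : cs[q] ≠ '>' := by
          intro hc; rw [if_pos hc] at hf; exact absurd hf (by decide)
        rw [if_neg hne] at hf
        have hf' : PySem.Chars.find (cs.drop (q + 1)) ['>'] = -1 := by
          by_contra hc
          rw [if_neg hc] at hf
          have := PySem.Chars.neg_one_le_find (cs.drop (q + 1)) ['>']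
          omega
        have htail := ih (q + 1) (by omega) hf'
        by_cases hlt2 : cs[q] = '<'
        · rw [if_pos hlt2]
          have hte : tagEnd cs (q + 1) = none := by
            rw [pv_tagEnd_eq cs (q + 1) (by omega), if_pos hf']
          rw [hte]
          exact htail
        · rw [if_neg hlt2]; exact htail
      · rw [dif_neg hlt]

theorem pv_findFrom_ge (cs : List Char) (d : Char) (p : Nat) (hp : cs.length ≤ p) :
    PySem.Chars.findFrom cs [d] (p : Int) none = -1 := by
  rcases eq_or_lt_of_le hp with h | h
  · rw [PySem.Chars.findFrom_natCast cs [d] p (by omega)]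
    rw [List.drop_eq_nil_of_le (by omega)]
    simp [PySem.Chars.find, pv_go_nil]
  · unfold PySem.Chars.findFrom
    rw [if_pos]
    push_cast
    omega

theorem pv_findFrom_nonpos (s sub : List Char) (i : Int) (hi : i + (s.length : Int) ≤ 0) :
    PySem.Chars.findFrom s sub i none = PySem.Chars.findFrom s sub 0 none := by
  unfold PySem.Chars.findFrom
  simp only [Int.toNat_natCast, List.take_length]
  have hst : (if i < 0 then if i + (s.length : Int) < 0 then 0 else i + (s.length : Int) else i)
      = (0 : Int) := by split_ifs <;> omega
  rw [hst]
  have hst0 : (if (0 : Int) < 0 then if (0 : Int) + (s.length : Int) < 0 then 0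
      else (0 : Int) + (s.length : Int) else (0 : Int)) = (0 : Int) := by norm_num
  rw [hst0]

-- A = scanA: the find-driven loop equals the position-indexed scan
theorem pv_main (text : String) : ∀ (n p : Nat), text.toList.length - p ≤ n →
    tag_definition text (p : Int) = scanA text.toList p := by
  intro n
  induction n with
  | zero =>
      intro p hp
      rw [tag_definition, scanA]
      rw [dif_neg (show ¬ p < text.toList.length by omega)]
      rw [dif_pos]
      simp only [PySem.Str.findFrom]
      exact pv_findFrom_ge text.toList '<' p (by omega)
  | succ n ih =>
      intro p hp
      by_cases hlt : p < text.toList.length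
      · rw [tag_definition, scanA, dif_pos hlt]
        simp only [PySem.Str.findFrom]
        have hdrop := List.drop_eq_getElem_cons hlt
        by_cases hc : text.toList[p] = '<'
        · rw [if_pos hc]
          have hsp : PySem.Chars.findFrom text.toList "<".toList (p : Int) none = (p : Int) := by
            rw [show "<".toList = ['<'] from rfl,
                PySem.Chars.findFrom_natCast text.toList ['<'] p (by omega)]
            rw [hdrop, pv_find_cons, if_pos hc]
            simp
          rw [hsp]
          rw [dif_neg (by omega)]
          have hfgt := PySem.Chars.neg_one_le_find (text.toList.drop (p + 1)) ['>']
          have hep : PySem.Chars.findFrom text.toList ">".toList (p : Int) none =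
              (if PySem.Chars.find (text.toList.drop (p + 1)) ['>'] = -1 then -1
               else (p : Int) + 1 + PySem.Chars.find (text.toList.drop (p + 1)) ['>']) := by
            rw [show ">".toList = ['>'] from rfl,
                PySem.Chars.findFrom_natCast text.toList ['>'] p (by omega)]
            rw [hdrop, pv_find_cons, if_neg (show text.toList[p] ≠ '>' by rw [hc]; decide)]
            split_ifs <;> omega
          rw [hep]
          by_cases hf : PySem.Chars.find (text.toList.drop (p + 1)) ['>'] = -1
          · rw [if_pos hf, dif_pos rfl]
            have hte : tagEnd text.toList (p + 1) = none := by
              rw [pv_tagEnd_eq text.toList (p + 1) (by omega), if_pos hf]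
            rw [hte]
            exact (pv_scanA_nil text.toList (text.toList.length) (p + 1) (by omega) hf).symm
          · rw [if_neg hf]
            set f := PySem.Chars.find (text.toList.drop (p + 1)) ['>'] with hfdef
            have hf0 : 0 ≤ f := by omega
            rw [dif_neg (by omega)]
            have hte : tagEnd text.toList (p + 1) = some (p + 1 + f.toNat + 1) := by
              rw [pv_tagEnd_eq text.toList (p + 1) (by omega), if_neg hf]
            rw [hte]
            congr 1
            · simp only [Prod.mk.injEq]
              refine ⟨?_, by omega⟩
              simp only [PySem.Str.slice, PySem.Chars.slice_eq_listSlice]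
              rw [PySem.List.slice_toNat text.toList (by omega) (by omega)]
              congr 2 <;> omega
            · have := ih (p + 1 + f.toNat + 1) (by omega)
              rw [show ((p : Int) + 1 + f + 1) = ((p + 1 + f.toNat + 1 : Nat) : Int) by push_cast; omega]
              exact this
        · rw [if_neg hc]
          have hstep : PySem.Chars.findFrom text.toList "<".toList (p : Int) none =
              PySem.Chars.findFrom text.toList "<".toList ((p + 1 : Nat) : Int) none := by
            rw [show "<".toList = ['<'] from rfl]
            exact pv_findFrom_succ text.toList '<' p hlt hc
          rw [hstep]
          have := ih (p + 1) (by omega)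
          rw [tag_definition] at this
          simp only [PySem.Str.findFrom] at this
          push_cast at this ⊢
          exact this
      · rw [tag_definition, scanA, dif_neg hlt, dif_pos]
        simp only [PySem.Str.findFrom]
        exact pv_findFrom_ge text.toList '<' p (by omega)

-- B's in-tag buffer run equals a tagEnd lookup
theorem pv_scanB_buf (cs : List Char) : ∀ (n q : Nat) (b : List Char), cs.length - q ≤ n →
    q ≤ cs.length →
    scanB (cs.drop q) q (some b) =
      (match tagEnd cs q with
       | none => []
       | some e =>
           (String.ofList (b ++ (cs.drop q).take (e - q)), (e : Int)) :: scanB (cs.drop e) e none) := by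
  intro n
  induction n with
  | zero =>
      intro q b hq hle
      have hlen : cs.length = q := by omega
      rw [List.drop_eq_nil_of_le (by omega)]
      have hte : tagEnd cs q = none := by
        rw [tagEnd]
        rw [List.getElem?_eq_none (by omega)]
      rw [hte, scanB]
  | succ n ih =>
      intro q b hq hle
      by_cases hlt : q < cs.length
      · have hdrop := List.drop_eq_getElem_cons hlt
        have hte0 : tagEnd cs q =
            (if cs[q] = '>' then some (q + 1) else tagEnd cs (q + 1)) := by
          rw [tagEnd, List.getElem?_eq_getElem hlt]
        by_cases hc : cs[q] = '>'
        · rw [hdrop, scanB]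
          simp only [hc, if_true]
          rw [hte0, if_pos hc]
          simp only
          rw [show q + 1 - q = 1 by omega]
          push_cast
          simp
        · rw [hdrop, scanB]
          simp only [if_neg hc]
          rw [ih (q + 1) (b ++ [cs[q]]) (by omega) (by omega)]
          rw [hte0, if_neg hc]
          rcases h : tagEnd cs (q + 1) with _ | e
        
          · rfl
          · have hb := pv_tagEnd_bounds cs (q + 1) e h
            simp only
            congr 3
            rw [List.append_assoc]
            congr 1
            rw [show e - q = (e - (q + 1)) + 1 by omega]
            rw [List.take_succ_cons]
            simp
      · have hlen : cs.length = q := by omega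
        rw [List.drop_eq_nil_of_le (by omega)]
        have hte : tagEnd cs q = none := by
          rw [tagEnd]
          rw [List.getElem?_eq_none (by omega)]
        rw [hte, scanB]

-- scanA = scanB: the two scans agree from every position in the no-tag state
theorem pv_bridge (cs : List Char) : ∀ (n p : Nat), cs.length - p ≤ n →
    scanA cs p = scanB (cs.drop p) p none := by
  intro n
  induction n with
  | zero =>
      intro p hp
      rw [scanA, dif_neg (by omega), List.drop_eq_nil_of_le (by omega), scanB]
  | succ n ih =>
      intro p hp
      by_cases hlt : p < cs.length
      · have hdrop := List.drop_eq_getElem_cons hlt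
        rw [scanA, dif_pos hlt, hdrop, scanB]
        by_cases hc : cs[p] = '<'
        · simp only [hc, if_true]
          rw [pv_scanB_buf cs cs.length (p + 1) ['<'] (by omega) (by omega)]
          rcases h : tagEnd cs (p + 1) with _ | e
          · have hf : PySem.Chars.find (cs.drop (p + 1)) ['>'] = -1 := by
              have ht := pv_tagEnd_eq cs (p + 1) (by omega)
              rw [h] at ht
              by_contra hc2
              rw [if_neg hc2] at ht
              simp at ht
            exact pv_scanA_nil cs cs.length (p + 1) (by omega) hf
          · have hb := pv_tagEnd_bounds cs (p + 1) e h
            dsimp only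
            congr 2
            · rw [show e - p = (e - (p + 1)) + 1 by omega, List.take_succ_cons]
              rfl
            · exact ih e (by omega)
        · simp only [if_neg hc]
          exact ih (p + 1) (by omega)
      · rw [scanA, dif_neg hlt, List.drop_eq_nil_of_le (by omega), scanB]

-- ===== VERDICT (by name: the statement is the Claim_ definition above) =====
theorem tag_definition_spec : Claim_equal_tag_definition := by
  intro text index _ hpre
  unfold Spec_tag_definition tag_definition_alt
  by_cases h0 : 0 ≤ index
  · have h := pv_main text (text.toList.length) index.toNat (by omega)
    rw [Int.toNat_of_nonneg h0] at h
    rw [h]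
    exact pv_bridge text.toList (text.toList.length) index.toNat (by omega)
  · have hle : index + (text.toList.length : Int) ≤ 0 := by
      rcases hpre with hpre | hpre
      · exact absurd hpre h0
      · exact hpre
    have hstep : tag_definition text index = tag_definition text 0 := by
      conv_lhs => rw [tag_definition]
      conv_rhs => rw [tag_definition]
      simp only [PySem.Str.findFrom]
      rw [pv_findFrom_nonpos text.toList "<".toList index hle]
    rw [hstep]
    have h := pv_main text (text.toList.length) 0 (by omega)
    simp only [Nat.cast_zero] at h
    rw [h, show index.toNat = 0 by omega]
    exact pv_bridge text.toList (text.toList.length) 0 (by omega)
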